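-- pv_equiv track=rewrite | github.com/Blaok/soda | src/soda/optimization/temporal_cse.py | range_from_middle
-- ===== SOURCE A (Python) =====
-- from typing import (
--     overload,
--     Callable,
--     Dict,
--     FrozenSet,
--     Iterable,
--     Iterator,
--     List,
--     Optional,
--     Sequence,
--     Set,
--     Tuple,
--     Type,
--     Union,
-- )
--
-- def range_from_middle(n: int) -> Iterator[int]:
--   """A range function that yields number from the middle to the sides.
--
--   Args:
--     n: Integer, the upper bound of the range.
--   Yields:
--     Integers, starting from the n / 2 towards 0 and n - 1.
--   """
--   middle = n // 2
--   if n % 2 == 0: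
--     for shift in range(0, middle):
--       yield middle - shift - 1
--       yield middle + shift
--   else:
--     yield middle
--     for shift in range(1, middle + 1):
--       yield middle - shift
--       yield middle + shift
-- ===== SOURCE B (Python) =====
-- def range_from_middle(n: int):
--   """Yield range(n) sorted by distance from the centre (lower side wins ties)."""
--   def rank(i):
--     d = 2 * i - (n - 1)          # signed, doubled distance from the centre of range(n)
--     return 2 * abs(d) + (d > 0)  # upper side ranks just after the equally-distant lower side
--   yield from sorted(range(n), key=rank)
-- ===== Notes on version B (the rewrite author's own statement) =====
-- stated objective: alternative
-- what changed: B abandons A's parity-branched generation loop entirely: it sorts range(n) by an explicit rank key (doubled distance from the centre, with the upper side ranked just after the equally-distant lower side), i.e. a sort-by-key algorithm instead of interleaved emission.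
-- intended difference: For negative odd n, A yields one spurious element (its unconditional pre-loop yield of the middle) while B yields nothing; the empty sequence is intended since range(n) is empty for negative n. — e.g. on range_from_middle(-1): A returns [-1], B returns []
import Mathlib
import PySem

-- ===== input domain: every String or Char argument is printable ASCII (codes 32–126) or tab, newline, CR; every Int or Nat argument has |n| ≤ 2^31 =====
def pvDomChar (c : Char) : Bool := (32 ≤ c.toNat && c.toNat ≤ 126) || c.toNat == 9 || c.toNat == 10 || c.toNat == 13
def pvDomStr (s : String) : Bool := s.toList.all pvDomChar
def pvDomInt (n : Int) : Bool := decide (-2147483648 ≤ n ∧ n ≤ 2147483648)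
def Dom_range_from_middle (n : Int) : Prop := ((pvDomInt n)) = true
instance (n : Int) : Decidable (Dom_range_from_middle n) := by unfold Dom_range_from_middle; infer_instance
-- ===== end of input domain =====

-- B replaces A's parity-branched middle±shift generation loop by sorting range(n) under an
-- explicit rank key (sort-by-key algorithm instead of interleaved emission; same values).

-- ===== PORT A =====
def range_from_middle (n : Int) : List Int :=
  let middle := PySem.Int.floordiv n 2
  if PySem.Int.mod n 2 == 0 then
    (PySem.List.pyRange 0 middle).foldl
      (fun acc shift => acc ++ [middle - shift - 1, middle + shift]) []
  else
    (PySem.List.pyRange 1 (middle + 1)).foldl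
      (fun acc shift => acc ++ [middle - shift, middle + shift]) [middle]

-- ===== PORT B =====
-- rank(i) of Source B: doubled distance from the centre of range(n); the upper side ranks
-- just after the equally-distant lower side.
def pvRank (n i : Int) : Int :=
  let d := 2 * i - (n - 1)
  2 * |d| + (if 0 < d then 1 else 0)

def range_from_middle_alt (n : Int) : List Int :=
  PySem.List.sorted (PySem.List.pyRange 0 n) (pvRank n)

-- ===== PRECONDITION & SPEC =====
-- For negative odd n, A yields one spurious element (its unconditional pre-loop yield of
-- the middle) while B yields nothing; the empty sequence is intended since range(n) is
-- empty for negative n.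
def D_range_from_middle (n : Int) : Prop := n < 0 ∧ PySem.Int.mod n 2 = 1
instance (n : Int) : Decidable (D_range_from_middle n) := by unfold D_range_from_middle; infer_instance

def Spec_range_from_middle (n : Int) (out : List Int) : Prop := ¬ D_range_from_middle n → out = range_from_middle_alt n
instance (n : Int) (out : List Int) : Decidable (Spec_range_from_middle n out) := by unfold Spec_range_from_middle; infer_instance

def pvDiffWitness_range_from_middle : Int := (-1)
def pvDiffWitnessOut_range_from_middle : (List Int) × (List Int) := ([-1], [])

-- ===== CLAIM (what is proved, stated in full; the proofs are below) =====
def Claim_unchanged_range_from_middle : Prop := ∀ (n : Int), Dom_range_from_middle n → Spec_range_from_middle n (range_from_middle n)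
def Claim_changed_range_from_middle : Prop := Dom_range_from_middle (pvDiffWitness_range_from_middle) ∧ D_range_from_middle (pvDiffWitness_range_from_middle) ∧ range_from_middle (pvDiffWitness_range_from_middle) = pvDiffWitnessOut_range_from_middle.1 ∧ range_from_middle_alt (pvDiffWitness_range_from_middle) = pvDiffWitnessOut_range_from_middle.2 ∧ pvDiffWitnessOut_range_from_middle.1 ≠ pvDiffWitnessOut_range_from_middle.2
def Claim_exact_range_from_middle : Prop := ∀ (n : Int), Dom_range_from_middle n → D_range_from_middle n → range_from_middle n ≠ range_from_middle_alt n

-- ===== LEMMAS AND PROOFS =====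

theorem nodup_of_pairwise_rank {l : List Int} {k : Int → Int}
    (h : l.Pairwise (fun a b => k a < k b)) : l.Nodup :=
  h.imp (fun hab => by rintro rfl; omega)

theorem pyRange_zero_nodup (n : Int) : (PySem.List.pyRange 0 n).Nodup := by
  rw [PySem.List.pyRange_one]
  exact List.nodup_range.map (fun a b hab => by omega)

-- the workhorse: any strictly rank-increasing enumeration of range(n) is B's output
theorem sorted_rank_eq (n : Int) (ys : List Int)
    (hmem : ∀ x, x ∈ ys ↔ 0 ≤ x ∧ x < n)
    (hpw : ys.Pairwise (fun a b => pvRank n a < pvRank n b)) :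
    range_from_middle_alt n = ys := by
  unfold range_from_middle_alt
  refine PySem.List.sorted_eq_of_perm_of_pairwise_lt _ _ _ ?_ hpw
  refine List.perm_of_nodup_nodup_toFinset_eq (nodup_of_pairwise_rank hpw)
    (pyRange_zero_nodup n) ?_
  ext x
  simp [hmem, PySem.List.mem_pyRange_one]

theorem range_from_middle_eq_alt (n : Int) (hD : ¬ D_range_from_middle n) :
    range_from_middle n = range_from_middle_alt n := by
  have hn := PySem.Int.floordiv_mul_add_mod n 2
  have hm2 : PySem.Int.mod n 2 = 0 ∨ PySem.Int.mod n 2 = 1 := by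
    have h1 := PySem.Int.mod_nonneg n (b := 2) (by norm_num)
    have h2 := PySem.Int.mod_lt n (b := 2) (by norm_num)
    omega
  set m := PySem.Int.floordiv n 2 with hm
  by_cases hneg : n < 0
  · -- n < 0: outside D_ it is even; both sides are empty
    have h0 : PySem.Int.mod n 2 = 0 := by
      rcases hm2 with h | h
      · exact h
      · exact absurd ⟨hneg, h⟩ hD
    have e1 : PySem.List.pyRange 0 m = ([] : List Int) := by
      rw [PySem.List.pyRange_one]
      have : (m - 0).toNat = 0 := by omega
      rw [this]; rfl
    have e2 : PySem.List.pyRange 0 n = ([] : List Int) := by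
      rw [PySem.List.pyRange_one]
      have : (n - 0).toNat = 0 := by omega
      rw [this]; rfl
    simp only [range_from_middle, range_from_middle_alt, ← hm, h0, e1, e2,
      beq_self_eq_true, if_true, List.foldl_nil]
    rfl
  · rw [Int.not_lt] at hneg
    rcases hm2 with h | h
    · -- even n = 2m
      have hA : range_from_middle n =
          (List.range m.toNat).flatMap (fun (k : Nat) => [m - (k : Int) - 1, m + (k : Int)]) := by
        simp only [range_from_middle, ← hm, h, beq_self_eq_true, if_true]
        rw [PySem.List.pyRange_one, PySem.List.foldl_append_eq_flatMap]
        simp only [List.nil_append, List.flatMap_map, zero_add, Int.sub_zero]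
      rw [hA]
      symm
      apply sorted_rank_eq
      · intro x
        simp only [List.mem_flatMap, List.mem_range, List.mem_cons, List.not_mem_nil, or_false]
        constructor
        · rintro ⟨k, hk, rfl | rfl⟩ <;> omega
        · rintro ⟨hx0, hxn⟩
          refine ⟨(if x < m then m - 1 - x else x - m).toNat, by split_ifs <;> omega, ?_⟩
          by_cases hxm : x < m
          · left; rw [if_pos hxm]; omega
          · right; rw [if_neg hxm]; omega
      · rw [List.pairwise_flatMap]
        constructor
        · intro k hk
          simp only [List.pairwise_cons, List.mem_cons, List.not_mem_nil, or_false, forall_eq]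
          unfold pvRank
          have h1 : |2 * (m - (k : Int) - 1) - (n - 1)| = 2 * k + 1 := by
            rw [abs_of_nonpos (by omega)]; omega
          have h2 : |2 * (m + (k : Int)) - (n - 1)| = 2 * k + 1 := by
            rw [abs_of_nonneg (by omega)]; omega
          simp only [h1, h2]
          refine ⟨?_, fun a' h' => h'.elim, List.Pairwise.nil⟩
          split_ifs with c1 c2 <;> omega
        · refine List.pairwise_lt_range.imp ?_
          intro k₁ k₂ hlt x hx y hy
          simp only [List.mem_cons, List.not_mem_nil, or_false] at hx hy
          unfold pvRank
          have hx' : |2 * x - (n - 1)| = 2 * k₁ + 1 := by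
            rcases hx with rfl | rfl
            · rw [abs_of_nonpos (by omega)]; omega
            · rw [abs_of_nonneg (by omega)]; omega
          have hy' : |2 * y - (n - 1)| = 2 * k₂ + 1 := by
            rcases hy with rfl | rfl
            · rw [abs_of_nonpos (by omega)]; omega
            · rw [abs_of_nonneg (by omega)]; omega
          simp only [hx', hy']
          split_ifs with c1 c2 <;> omega
    · -- odd n = 2m + 1
      have hA : range_from_middle n =
          m :: (List.range m.toNat).flatMap
            (fun (k : Nat) => [m - (1 + (k : Int)), m + (1 + (k : Int))]) := by
        simp only [range_from_middle, ← hm, h]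
        rw [if_neg (by decide)]
        rw [PySem.List.pyRange_one]
        have hmt : ((m + 1 : Int) - 1).toNat = m.toNat := by omega
        rw [hmt, PySem.List.foldl_append_eq_flatMap]
        simp only [List.singleton_append, List.flatMap_map]
      rw [hA]
      symm
      apply sorted_rank_eq
      · intro x
        simp only [List.mem_cons, List.mem_flatMap, List.mem_range, List.not_mem_nil, or_false]
        constructor
        · rintro (rfl | ⟨k, hk, rfl | rfl⟩) <;> omega
        · rintro ⟨hx0, hxn⟩
          by_cases hxm : x = m
          · exact Or.inl hxm
          · refine Or.inr ⟨(if x < m then m - 1 - x else x - m - 1).toNat,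
              by split_ifs <;> omega, ?_⟩
            by_cases hlt : x < m
            · left; rw [if_pos hlt]; omega
            · right; rw [if_neg hlt]; omega
      · rw [List.pairwise_cons]
        constructor
        · intro y hy
          simp only [List.mem_flatMap, List.mem_range, List.mem_cons, List.not_mem_nil,
            or_false] at hy
          obtain ⟨k, hk, hy⟩ := hy
          unfold pvRank
          have hmv : |2 * m - (n - 1)| = 0 := by rw [abs_of_nonneg (by omega)]; omega
          have hy' : |2 * y - (n - 1)| = 2 * ((k : Int) + 1) := by
            rcases hy with rfl | rfl
            · rw [abs_of_nonpos (by omega)]; omega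
            · rw [abs_of_nonneg (by omega)]; omega
          simp only [hmv, hy']
          split_ifs with c1 c2 <;> omega
        · rw [List.pairwise_flatMap]
          constructor
          · intro k hk
            simp only [List.pairwise_cons, List.mem_cons, List.not_mem_nil, or_false, forall_eq]
            unfold pvRank
            have h1 : |2 * (m - (1 + (k : Int))) - (n - 1)| = 2 * ((k : Int) + 1) := by
              rw [abs_of_nonpos (by omega)]; omega
            have h2 : |2 * (m + (1 + (k : Int))) - (n - 1)| = 2 * ((k : Int) + 1) := by
              rw [abs_of_nonneg (by omega)]; omega
            simp only [h1, h2]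
            refine ⟨?_, fun a' h' => h'.elim, List.Pairwise.nil⟩
            split_ifs with c1 c2 <;> omega
          · refine List.pairwise_lt_range.imp ?_
            intro k₁ k₂ hlt x hx y hy
            simp only [List.mem_cons, List.not_mem_nil, or_false] at hx hy
            unfold pvRank
            have hx' : |2 * x - (n - 1)| = 2 * ((k₁ : Int) + 1) := by
              rcases hx with rfl | rfl
              · rw [abs_of_nonpos (by omega)]; omega
              · rw [abs_of_nonneg (by omega)]; omega
            have hy' : |2 * y - (n - 1)| = 2 * ((k₂ : Int) + 1) := by
              rcases hy with rfl | rfl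
              · rw [abs_of_nonpos (by omega)]; omega
              · rw [abs_of_nonneg (by omega)]; omega
            simp only [hx', hy']
            split_ifs with c1 c2 <;> omega

-- ===== VERDICT (by name: the statement is the Claim_ definition above) =====
theorem range_from_middle_spec : Claim_unchanged_range_from_middle := by
  intro n _ hD
  exact (range_from_middle_eq_alt n hD).symm ▸ rfl

theorem range_from_middle_changed : Claim_changed_range_from_middle := by
  unfold Claim_changed_range_from_middle; decide

theorem range_from_middle_tight : Claim_exact_range_from_middle := by
  intro n _ hD
  obtain ⟨hneg, hodd⟩ := hD
  have hn := PySem.Int.floordiv_mul_add_mod n 2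
  have e1 : PySem.List.pyRange 1 (PySem.Int.floordiv n 2 + 1) = ([] : List Int) := by
    rw [PySem.List.pyRange_one]
    have : (PySem.Int.floordiv n 2 + 1 - 1).toNat = 0 := by omega
    rw [this]; rfl
  have e2 : PySem.List.pyRange 0 n = ([] : List Int) := by
    rw [PySem.List.pyRange_one]
    have : (n - 0).toNat = 0 := by omega
    rw [this]; rfl
  have hB : range_from_middle_alt n = [] := by
    simp only [range_from_middle_alt, e2]; rfl
  have hA : range_from_middle n = [PySem.Int.floordiv n 2] := by
    simp only [range_from_middle, hodd]
    rw [if_neg (by decide), e1]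
    rfl
  rw [hA, hB]
  simp
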